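-- pv_equiv track=rewrite | github.com/serj93/patents-claim-handler | tools/structanalysis.py | isBetweenN
-- ===== SOURCE A (Python) =====
-- def isBetweenN(np_indexes, cconj_index):
--     """
--     Проверка попадания между индексов И (N И N = 0 3 5)
--     """
--     result = False
--
--     if len(np_indexes) <= 1:
--         return False
--
--     left_catch = False
--     for np_index in np_indexes:
--         if left_catch:
--             if np_index > cconj_index:
--                 result = True
--                 break
--             else:
--                 left_catch = True
--                 continue
--         else:
--             left_catch = np_index < cconj_index
--             continue
--
--         left_catch = False
--
--     return result
-- ===== SOURCE B (Python) =====
-- def isBetweenN(np_indexes, cconj_index):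
--     below = [i for i, x in enumerate(np_indexes) if x < cconj_index]
--     above = [i for i, x in enumerate(np_indexes) if x > cconj_index]
--     return bool(below) and bool(above) and min(below) < max(above)
-- ===== Notes on version B (the rewrite author's own statement) =====
-- stated objective: alternative
-- what changed: Replaced A's flag-carrying sequential scan by an order-free index-set formulation: collect the indices of elements below and above cconj_index and return whether the smallest 'below' index precedes the largest 'above' index.
import Mathlib
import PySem

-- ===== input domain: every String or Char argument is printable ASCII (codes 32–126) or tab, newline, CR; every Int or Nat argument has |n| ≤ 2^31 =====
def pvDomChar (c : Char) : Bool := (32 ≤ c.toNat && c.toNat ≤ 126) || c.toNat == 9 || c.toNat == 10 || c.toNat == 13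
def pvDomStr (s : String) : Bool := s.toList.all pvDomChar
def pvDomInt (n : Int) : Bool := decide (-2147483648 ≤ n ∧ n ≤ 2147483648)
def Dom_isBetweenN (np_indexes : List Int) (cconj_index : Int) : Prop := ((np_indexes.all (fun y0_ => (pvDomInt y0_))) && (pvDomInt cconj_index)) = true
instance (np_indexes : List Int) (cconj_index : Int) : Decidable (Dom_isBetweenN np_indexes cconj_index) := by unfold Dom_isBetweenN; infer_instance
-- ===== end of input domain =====

-- B replaces A's flag-carrying sequential loop by an index-set formulation (indices of elements
-- below/above the pivot, compare min of the first set with max of the second); same value everywhere.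

-- ===== PORT A =====
-- A's loop: state left_catch; once true it stays true (the inner else re-sets it true)
def isBetweenN_loop (xs : List Int) (cconj_index : Int) (left_catch : Bool) : Bool :=
  match xs with
  | [] => false
  | np_index :: rest =>
    if left_catch then
      if np_index > cconj_index then true
      else isBetweenN_loop rest cconj_index true
    else
      isBetweenN_loop rest cconj_index (decide (np_index < cconj_index))

def isBetweenN (np_indexes : List Int) (cconj_index : Int) : Bool :=
  if np_indexes.length ≤ 1 then false
  else isBetweenN_loop np_indexes cconj_index false

-- ===== PORT B =====
def isBetweenN_alt (np_indexes : List Int) (cconj_index : Int) : Bool :=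
  let below := ((PySem.List.enumerate np_indexes).filter (fun p => decide (p.2 < cconj_index))).map Prod.fst
  let above := ((PySem.List.enumerate np_indexes).filter (fun p => decide (p.2 > cconj_index))).map Prod.fst
  !below.isEmpty && !above.isEmpty &&
    (match PySem.List.min? below (fun x => x), PySem.List.max? above (fun x => x) with
     | some i, some j => decide (i < j)
     | _, _ => false)

-- ===== PRECONDITION & SPEC =====
def Spec_isBetweenN (np_indexes : List Int) (cconj_index : Int) (out : Bool) : Prop := out = isBetweenN_alt np_indexes cconj_index
instance (np_indexes : List Int) (cconj_index : Int) (out : Bool) : Decidable (Spec_isBetweenN np_indexes cconj_index out) := by unfold Spec_isBetweenN; infer_instance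

-- ===== CLAIM (what is proved, stated in full; the proofs are below) =====
def Claim_equal_isBetweenN : Prop := ∀ (np_indexes : List Int) (cconj_index : Int), Dom_isBetweenN np_indexes cconj_index → Spec_isBetweenN np_indexes cconj_index (isBetweenN np_indexes cconj_index)

-- ===== LEMMAS AND PROOFS =====

-- the common characterisation: some element below c occurs strictly before some element above c
def Pat (xs : List Int) (c : Int) : Prop :=
  ∃ i j : Nat, i < j ∧ (∃ a, xs[i]? = some a ∧ a < c) ∧ (∃ b, xs[j]? = some b ∧ c < b)

lemma loop_true_any (xs : List Int) (c : Int) :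
    isBetweenN_loop xs c true = xs.any (fun x => decide (c < x)) := by
  induction xs with
  | nil => rfl
  | cons x rest ih =>
    simp only [isBetweenN_loop, List.any_cons, ih]
    by_cases h : c < x <;> simp [h]

lemma pat_cons_lt {x : Int} {rest : List Int} {c : Int} (hx : x < c) :
    Pat (x :: rest) c ↔ ∃ b ∈ rest, c < b := by
  constructor
  · rintro ⟨i, j, hij, _, ⟨b, hb, hbc⟩⟩
    obtain ⟨j', rfl⟩ : ∃ j', j = j' + 1 := ⟨j - 1, by omega⟩
    simp only [List.getElem?_cons_succ] at hb
    exact ⟨b, List.mem_of_getElem? hb, hbc⟩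
  · rintro ⟨b, hb, hbc⟩
    obtain ⟨k, hk, rfl⟩ := List.mem_iff_getElem.mp hb
    exact ⟨0, k + 1, by omega, ⟨x, rfl, hx⟩,
      ⟨rest[k], by simp [List.getElem?_eq_getElem hk], hbc⟩⟩

lemma pat_cons_not_lt {x : Int} {rest : List Int} {c : Int} (hx : ¬ x < c) :
    Pat (x :: rest) c ↔ Pat rest c := by
  constructor
  · rintro ⟨i, j, hij, ⟨a, ha, hac⟩, ⟨b, hb, hbc⟩⟩
    obtain ⟨i', rfl⟩ : ∃ i', i = i' + 1 := by
      rcases i with _ | i'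
      · simp at ha; omega
      · exact ⟨i', rfl⟩
    obtain ⟨j', rfl⟩ : ∃ j', j = j' + 1 := ⟨j - 1, by omega⟩
    simp only [List.getElem?_cons_succ] at ha hb
    exact ⟨i', j', by omega, ⟨a, ha, hac⟩, ⟨b, hb, hbc⟩⟩
  · rintro ⟨i, j, hij, ⟨a, ha, hac⟩, ⟨b, hb, hbc⟩⟩
    exact ⟨i + 1, j + 1, by omega, ⟨a, by simpa using ha, hac⟩, ⟨b, by simpa using hb, hbc⟩⟩

lemma loop_false_iff_pat (xs : List Int) (c : Int) :
    isBetweenN_loop xs c false = true ↔ Pat xs c := by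
  induction xs with
  | nil =>
    simp only [isBetweenN_loop, Pat]
    constructor
    · intro h; exact absurd h (by simp)
    · rintro ⟨i, j, _, _, ⟨b, hb, _⟩⟩; simp at hb
  | cons x rest ih =>
    by_cases h : x < c
    · rw [pat_cons_lt h]
      simp only [isBetweenN_loop, Bool.false_eq_true, if_false, h, decide_true,
        loop_true_any, List.any_eq_true, decide_eq_true_eq]
    · rw [pat_cons_not_lt h]
      have hd : decide (x < c) = false := by simp [h]
      simp only [isBetweenN_loop, Bool.false_eq_true, if_false, hd]
      exact ih

lemma mem_below_iff {xs : List Int} {c k : Int} :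
    k ∈ ((PySem.List.enumerate xs).filter (fun p => decide (p.2 < c))).map Prod.fst ↔
      ∃ (n : Nat), (k = (n : Int)) ∧ ∃ a, xs[n]? = some a ∧ a < c := by
  simp only [List.mem_map, List.mem_filter, PySem.List.mem_enumerate_iff, decide_eq_true_eq]
  constructor
  · rintro ⟨⟨ki, v⟩, ⟨⟨n, hn, heq⟩, hv⟩, rfl⟩
    obtain ⟨rfl, rfl⟩ : ki = (n : Int) ∧ v = xs[n] := by
      simpa [Prod.ext_iff] using heq
    exact ⟨n, by simp, xs[n], List.getElem?_eq_getElem hn, hv⟩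
  · rintro ⟨n, rfl, a, ha, hac⟩
    have hn : n < xs.length := (List.getElem?_eq_some_iff.mp ha).1
    have hv : xs[n] = a := by
      have := List.getElem?_eq_getElem hn; rw [this] at ha; exact Option.some.inj ha
    exact ⟨((n : Int), xs[n]), ⟨⟨n, hn, by simp⟩, by rw [hv]; exact hac⟩, by simp⟩

lemma mem_above_iff {xs : List Int} {c k : Int} :
    k ∈ ((PySem.List.enumerate xs).filter (fun p => decide (p.2 > c))).map Prod.fst ↔
      ∃ (n : Nat), (k = (n : Int)) ∧ ∃ b, xs[n]? = some b ∧ c < b := by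
  simp only [List.mem_map, List.mem_filter, PySem.List.mem_enumerate_iff, decide_eq_true_eq, gt_iff_lt]
  constructor
  · rintro ⟨⟨ki, v⟩, ⟨⟨n, hn, heq⟩, hv⟩, rfl⟩
    obtain ⟨rfl, rfl⟩ : ki = (n : Int) ∧ v = xs[n] := by
      simpa [Prod.ext_iff] using heq
    exact ⟨n, by simp, xs[n], List.getElem?_eq_getElem hn, hv⟩
  · rintro ⟨n, rfl, b, hb, hbc⟩
    have hn : n < xs.length := (List.getElem?_eq_some_iff.mp hb).1
    have hv : xs[n] = b := by
      have := List.getElem?_eq_getElem hn; rw [this] at hb; exact Option.some.inj hb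
    exact ⟨((n : Int), xs[n]), ⟨⟨n, hn, by simp⟩, by rw [hv]; exact hbc⟩, by simp⟩

lemma alt_iff_pat (xs : List Int) (c : Int) :
    isBetweenN_alt xs c = true ↔ Pat xs c := by
  unfold isBetweenN_alt
  set below := ((PySem.List.enumerate xs).filter (fun p => decide (p.2 < c))).map Prod.fst with hbdef
  set above := ((PySem.List.enumerate xs).filter (fun p => decide (p.2 > c))).map Prod.fst with hadef
  constructor
  · intro h
    simp only [Bool.and_eq_true] at h
    obtain ⟨⟨_, _⟩, hmatch⟩ := h
    rcases hmin : PySem.List.min? below (fun x => x) with _ | i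
    · rw [hmin] at hmatch; exact absurd hmatch (by simp)
    rcases hmax : PySem.List.max? above (fun x => x) with _ | j
    · rw [hmin, hmax] at hmatch; exact absurd hmatch (by simp)
    rw [hmin, hmax] at hmatch
    have hij : i < j := by simpa using hmatch
    obtain ⟨n, rfl, a, ha, hac⟩ := mem_below_iff.mp (PySem.List.min?_mem hmin)
    obtain ⟨m, rfl, b, hb, hbc⟩ := mem_above_iff.mp (PySem.List.max?_mem hmax)
    exact ⟨n, m, by exact_mod_cast hij, ⟨a, ha, hac⟩, ⟨b, hb, hbc⟩⟩
  · rintro ⟨n, m, hnm, ⟨a, ha, hac⟩, ⟨b, hb, hbc⟩⟩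
    have hnb : ((n : Int)) ∈ below := mem_below_iff.mpr ⟨n, rfl, a, ha, hac⟩
    have hma : ((m : Int)) ∈ above := mem_above_iff.mpr ⟨m, rfl, b, hb, hbc⟩
    have hbne : below ≠ [] := fun h => by simp [h] at hnb
    have hane : above ≠ [] := fun h => by simp [h] at hma
    rcases hmin : PySem.List.min? below (fun x => x) with _ | i
    · exact absurd ((PySem.List.min?_eq_none_iff below (fun x => x)).mp hmin) hbne
    rcases hmax : PySem.List.max? above (fun x => x) with _ | j
    · exact absurd ((PySem.List.max?_eq_none_iff above (fun x => x)).mp hmax) hane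
    have h1 : i ≤ (n : Int) := PySem.List.min?_id_le hmin _ hnb
    have h2 : ((m : Int)) ≤ j := PySem.List.max?_id_le hmax _ hma
    have hij : i < j := by
      have : ((n : Int)) < (m : Int) := by exact_mod_cast hnm
      omega
    simp [hbne, hane, hmin, hmax, hij]

lemma pat_length {xs : List Int} {c : Int} (h : Pat xs c) : 2 ≤ xs.length := by
  obtain ⟨i, j, hij, _, ⟨b, hb, _⟩⟩ := h
  have := (List.getElem?_eq_some_iff.mp hb).1
  omega

-- ===== VERDICT (by name: the statement is the Claim_ definition above) =====
theorem isBetweenN_spec : Claim_equal_isBetweenN := by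
  intro xs c _
  unfold Spec_isBetweenN isBetweenN
  by_cases h : xs.length ≤ 1
  · simp only [h, if_true]
    have : ¬ Pat xs c := fun hp => by have := pat_length hp; omega
    exact ((Bool.not_eq_true _).mp (fun ht => this ((alt_iff_pat xs c).mp ht))).symm
  · simp only [h, if_false]
    rw [Bool.eq_iff_iff, loop_false_iff_pat, alt_iff_pat]
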